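-- pv_equiv track=rewrite | github.com/Aleksey-Lyap/codewars_tasks | consec_kprimes.py | consec_kprimes
-- ===== SOURCE A (Python) =====
-- def consec_kprimes(k, arr):
--     """
--     Функция возвращает сколько раз k-простые чисела
--     (число, которое имеет ровно k простых делителей)
--     встречаются дважды в массиве arr.
--     """
--
--     def prime_factorization(number):
--         """Функция раскладывает чило на простые множетели"""
--         factors = []
--         divisor = 2
--         while divisor <= number:
--             if number % divisor == 0:
--                 factors.append(divisor)
--                 number //= divisor
--             else:
--                 divisor += 1
--         return factors
--
--     prime_factors_arr = [prime_factorization(num) for num in arr]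
--
--     count = 0
--     for i in range(len(arr) - 1):
--         if len(prime_factors_arr[i]) == k and len(prime_factors_arr[i + 1]) == k:
--             count += 1
--
--     return count
-- ===== SOURCE B (Python) =====
-- def consec_kprimes(k, arr):
--     """Sqrt-bounded factor counting (trial division only up to d*d <= n, plus
--     +1 for the remaining prime cofactor) and a zip-based adjacent pair count
--     over a list of booleans."""
--
--     def num_prime_factors(n):
--         cnt = 0
--         d = 2
--         while d * d <= n:
--             if n % d == 0:
--                 n //= d
--                 cnt += 1
--             else:
--                 d += 1
--         if n > 1:
--             cnt += 1
--         return cnt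
--
--     flags = [num_prime_factors(x) == k for x in arr]
--     return sum(a and b for a, b in zip(flags, flags[1:]))
-- ===== Notes on version B (the rewrite author's own statement) =====
-- stated objective: faster
-- what changed: B replaces A's full trial division (divisor runs all the way up to n, collecting a factor list per element, then an index-based adjacent scan) by sqrt-bounded trial division (stop at d*d>n, the remaining cofactor >1 is one prime factor) that only counts factors, and counts adjacent k-prime pairs by zipping the boolean flag list with its own tail.
import Mathlib
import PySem

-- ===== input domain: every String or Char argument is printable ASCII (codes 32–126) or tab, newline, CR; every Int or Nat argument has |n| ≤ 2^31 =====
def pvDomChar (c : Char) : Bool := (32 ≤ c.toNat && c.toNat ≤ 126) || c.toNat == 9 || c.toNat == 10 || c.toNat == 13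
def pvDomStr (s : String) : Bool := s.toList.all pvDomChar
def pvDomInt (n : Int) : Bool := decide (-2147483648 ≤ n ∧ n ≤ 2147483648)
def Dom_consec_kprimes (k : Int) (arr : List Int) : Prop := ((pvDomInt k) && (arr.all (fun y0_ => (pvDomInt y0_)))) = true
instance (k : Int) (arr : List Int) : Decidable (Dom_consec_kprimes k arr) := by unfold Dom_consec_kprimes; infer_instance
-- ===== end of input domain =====

-- B: sqrt-bounded trial division counting prime factors (stop at d*d>n, the leftover
-- cofactor >1 is one more prime) + zip-of-shifted-flag-lists pair count, instead of A's
-- full trial division building factor lists and an index-range adjacent scan (faster).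


-- ===== PORT A =====
-- while divisor <= number: … — fuel makes the loop structural; 2*number.toNat + 64
-- strictly exceeds the iteration count (the divisor increments fewer than number times
-- and each division shrinks number), so the fuel-0 branch is never reached.
def pvPFLoop : Nat → Int → Int → List Int → List Int
  | 0, _, _, factors => factors
  | fuel+1, number, divisor, factors =>
    if divisor ≤ number then
      if PySem.Int.mod number divisor == 0 then
        pvPFLoop fuel (PySem.Int.floordiv number divisor) divisor (factors ++ [divisor])
      else
        pvPFLoop fuel number (divisor + 1) factors
    else factors

def pvPrimeFactorization (number : Int) : List Int :=
  pvPFLoop (2 * number.toNat + 64) number 2 []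

def consec_kprimes (k : Int) (arr : List Int) : Int :=
  let prime_factors_arr := arr.map pvPrimeFactorization
  (PySem.List.pyRange 0 ((arr.length : Int) - 1) 1).foldl
    (fun count i =>
      if (((PySem.List.pyGetD prime_factors_arr i []).length : Int) == k) &&
         (((PySem.List.pyGetD prime_factors_arr (i+1) []).length : Int) == k)
      then count + 1 else count) 0

-- ===== PORT B =====
-- while d*d <= n: … — same fuel discipline; the loop returns the pair (final n, cnt)
-- so the trailing 'if n > 1: cnt += 1' can read the final n.
def pvBLoop : Nat → Int → Int → Int → Int × Int
  | 0, n, _, cnt => (n, cnt)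
  | fuel+1, n, d, cnt =>
    if d * d ≤ n then
      if PySem.Int.mod n d == 0 then
        pvBLoop fuel (PySem.Int.floordiv n d) d (cnt + 1)
      else
        pvBLoop fuel n (d + 1) cnt
    else (n, cnt)

def pvNumPrimeFactors (n : Int) : Int :=
  let r := pvBLoop (2 * n.toNat + 64) n 2 0
  if 1 < r.1 then r.2 + 1 else r.2

-- flags[1:] is flags.tail; sum(a and b for a, b in zip(flags, flags[1:])) is the fold
def consec_kprimes_alt (k : Int) (arr : List Int) : Int :=
  let flags := arr.map (fun x => pvNumPrimeFactors x == k)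
  (flags.zip flags.tail).foldl (fun s p => s + (if p.1 && p.2 then 1 else 0)) 0

-- ===== PRECONDITION & SPEC =====
def Spec_consec_kprimes (k : Int) (arr : List Int) (out : Int) : Prop := out = consec_kprimes_alt k arr
instance (k : Int) (arr : List Int) (out : Int) : Decidable (Spec_consec_kprimes k arr out) := by unfold Spec_consec_kprimes; infer_instance

-- ===== CLAIM =====
def Claim_equal_consec_kprimes : Prop := ∀ (k : Int) (arr : List Int), Dom_consec_kprimes k arr → Spec_consec_kprimes k arr (consec_kprimes k arr)

-- ===== LEMMAS AND PROOFS =====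

-- number of prime factors with multiplicity, by least-factor recursion
def pvOmega (n : Nat) : Nat :=
  if h : 2 ≤ n then 1 + pvOmega (n / n.minFac) else 0
termination_by n
decreasing_by
  exact Nat.div_lt_self (by omega) (Nat.minFac_prime (by omega)).one_lt

theorem pvOmega_small {n : Nat} (h : n < 2) : pvOmega n = 0 := by
  rw [pvOmega]; simp [Nat.not_le.mpr h]

theorem pvOmega_step {n : Nat} (h : 2 ≤ n) : pvOmega n = 1 + pvOmega (n / n.minFac) := by
  rw [pvOmega]; simp [h]

theorem pvMinFac_eq_of {n d : Nat} (h2 : 2 ≤ d) (hd : d ∣ n) (hn : 2 ≤ n)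
    (hinv : ∀ e, 2 ≤ e → e < d → ¬ e ∣ n) : n.minFac = d := by
  refine le_antisymm (Nat.minFac_le_of_dvd h2 hd) ?_
  by_contra h
  push_neg at h
  exact hinv _ (Nat.minFac_prime (by omega)).two_le h (Nat.minFac_dvd n)

-- the Int-side invariant transported to Nat
theorem pvInvNat {n d : Int} (hn : 1 ≤ n)
    (hinv : ∀ e : Int, 2 ≤ e → e < d → ¬ e ∣ n) :
    ∀ e : Nat, 2 ≤ e → e < d.toNat → ¬ e ∣ n.toNat := by
  intro e he hed hdvd
  have h1 : ((e : Int)) ∣ n := by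
    have : ((e : Int)) ∣ ((n.toNat : Int)) := Int.natCast_dvd_natCast.mpr hdvd
    rwa [Int.toNat_of_nonneg (by omega)] at this
  exact hinv e (by exact_mod_cast he) (by omega) h1

-- shared facts for one division step: n' = n // d with d ∣ n, 1 ≤ n, 2 ≤ d ≤ n
theorem pvDivStep {n d : Int} (hn : 1 ≤ n) (hd2 : 2 ≤ d) (hdn : d ≤ n) (hdvd : d ∣ n) :
    PySem.Int.floordiv n d = n / d ∧ 1 ≤ n / d ∧ n / d < n ∧
    (n / d).toNat = n.toNat / d.toNat ∧
    (∀ e : Int, e ∣ n / d → e ∣ n) := by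
  have hfd : PySem.Int.floordiv n d = n / d := PySem.Int.floordiv_eq_ediv_of_pos (by omega)
  have h1 : 1 ≤ n / d := by
    rw [Int.le_ediv_iff_mul_le (by omega)]; omega
  have htn : (n / d).toNat = n.toNat / d.toNat := by
    have hn' : (n.toNat : Int) = n := Int.toNat_of_nonneg (by omega)
    have hd' : (d.toNat : Int) = d := Int.toNat_of_nonneg (by omega)
    have : ((n.toNat / d.toNat : Nat) : Int) = n / d := by
      rw [Int.natCast_div, hn', hd']
    omega
  have hlt : n / d < n := by
    have : n.toNat / d.toNat < n.toNat := Nat.div_lt_self (by omega) (by omega)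
    omega
  refine ⟨hfd, h1, hlt, htn, ?_⟩
  intro e he
  have : n = n / d * d := (Int.ediv_mul_cancel hdvd).symm
  exact this ▸ Dvd.dvd.mul_right he d

theorem pvModZero {n d : Int} (hd : 2 ≤ d) (h : PySem.Int.mod n d = 0) : d ∣ n := by
  have := PySem.Int.mod_eq_emod_of_pos (a := n) (b := d) (by omega)
  rw [this] at h
  exact Int.dvd_of_emod_eq_zero h

theorem pvModNonZero {n d : Int} (hd : 2 ≤ d) (h : ¬ PySem.Int.mod n d = 0) : ¬ d ∣ n := by
  intro hdvd
  have := PySem.Int.mod_eq_emod_of_pos (a := n) (b := d) (by omega)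
  exact h (this ▸ Int.emod_eq_zero_of_dvd hdvd)

-- A's loop counts pvOmega
theorem pvLemA : ∀ (fuel : Nat) (n d : Int) (fs : List Int), 1 ≤ n → 2 ≤ d →
    (∀ e : Int, 2 ≤ e → e < d → ¬ e ∣ n) →
    (n + 1 - d).toNat + n.toNat < fuel →
    (pvPFLoop fuel n d fs).length = fs.length + pvOmega n.toNat := by
  intro fuel
  induction fuel with
  | zero => intro n d fs _ _ _ hf; omega
  | succ fuel ih =>
    intro n d fs hn hd hinv hf
    simp only [pvPFLoop]
    split_ifs with h1 h2
    · -- d ≤ n and d ∣ n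
      have hdvd : d ∣ n := pvModZero hd (by simpa using h2)
      obtain ⟨hfd, hn', hlt, htn, hpres⟩ := pvDivStep hn hd h1 hdvd
      rw [hfd]
      have hmin : n.toNat.minFac = d.toNat := by
        refine pvMinFac_eq_of (by omega) ?_ (by omega) (pvInvNat hn hinv)
        have : ((d.toNat : Int)) ∣ ((n.toNat : Int)) := by
          rwa [Int.toNat_of_nonneg (by omega), Int.toNat_of_nonneg (by omega)]
        exact_mod_cast this
      have := ih (n / d) d (fs ++ [d]) hn' hd
        (fun e he hed hdvde => hinv e he hed (hpres e hdvde)) (by omega)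
      rw [this, pvOmega_step (n := n.toNat) (by omega), hmin, ← htn]
      simp; omega
    · -- d ≤ n, d does not divide n
      have hndvd : ¬ d ∣ n := pvModNonZero hd (by simpa using h2)
      refine ih n (d + 1) fs hn (by omega) ?_ (by omega)
      intro e he hed
      rcases lt_or_eq_of_le (by omega : e ≤ d) with h | h
      · exact hinv e he h
      · exact h ▸ hndvd
    · -- d > n: n = 1 (else n ∣ n with 2 ≤ n < d contradicts the invariant)
      have : n.toNat < 2 := by
        by_contra hc
        exact hinv n (by omega) (by omega) (dvd_refl n)
      rw [pvOmega_small this]; omega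

-- B's loop counts pvOmega
theorem pvLemB : ∀ (fuel : Nat) (n d cnt : Int), 1 ≤ n → 2 ≤ d →
    (∀ e : Int, 2 ≤ e → e < d → ¬ e ∣ n) →
    (n + 1 - d).toNat + n.toNat < fuel →
    (if 1 < (pvBLoop fuel n d cnt).1 then (pvBLoop fuel n d cnt).2 + 1
     else (pvBLoop fuel n d cnt).2) = cnt + (pvOmega n.toNat : Int) := by
  intro fuel
  induction fuel with
  | zero => intro n d cnt _ _ _ hf; omega
  | succ fuel ih =>
    intro n d cnt hn hd hinv hf
    by_cases h1 : d * d ≤ n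
    · have hdn : d ≤ n := le_trans (by nlinarith) h1
      by_cases h2 : PySem.Int.mod n d = 0
      · -- d*d ≤ n and d ∣ n
        have hdvd : d ∣ n := pvModZero hd h2
        obtain ⟨hfd, hn', hlt, htn, hpres⟩ := pvDivStep hn hd hdn hdvd
        rw [show pvBLoop (fuel+1) n d cnt = pvBLoop fuel (n / d) d (cnt + 1) from by
          simp only [pvBLoop]; rw [if_pos h1, if_pos (by simp [h2]), hfd]]
        have hmin : n.toNat.minFac = d.toNat := by
          refine pvMinFac_eq_of (by omega) ?_ (by omega) (pvInvNat hn hinv)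
          have : ((d.toNat : Int)) ∣ ((n.toNat : Int)) := by
            rwa [Int.toNat_of_nonneg (by omega), Int.toNat_of_nonneg (by omega)]
          exact_mod_cast this
        rw [ih (n / d) d (cnt + 1) hn' hd
          (fun e he hed hdvde => hinv e he hed (hpres e hdvde)) (by omega)]
        rw [pvOmega_step (n := n.toNat) (by omega), hmin, ← htn]
        push_cast; omega
      · -- d*d ≤ n, d does not divide n
        have hndvd : ¬ d ∣ n := pvModNonZero hd h2
        rw [show pvBLoop (fuel+1) n d cnt = pvBLoop fuel n (d + 1) cnt from by
          simp only [pvBLoop]; rw [if_pos h1, if_neg (by simp [h2])]]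
        refine ih n (d + 1) cnt hn (by omega) ?_ (by omega)
        intro e he hed
        rcases lt_or_eq_of_le (by omega : e ≤ d) with h | h
        · exact hinv e he h
        · exact h ▸ hndvd
    · -- d*d > n: n = 1, or n is prime (its minFac would otherwise satisfy minFac² ≤ n < d²)
      rw [show pvBLoop (fuel+1) n d cnt = (n, cnt) from by
        simp only [pvBLoop]; rw [if_neg h1]]
      by_cases hn2 : n < 2
      · rw [if_neg (by simp; omega), pvOmega_small (by omega)]; omega
      · push_neg at hn2
        have hnt : 2 ≤ n.toNat := by omega
        have hprime : n.toNat.Prime := by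
          by_contra hp
          have hsq : n.toNat.minFac ^ 2 ≤ n.toNat := Nat.minFac_sq_le_self (by omega) hp
          have h2m : 2 ≤ n.toNat.minFac := (Nat.minFac_prime (by omega)).two_le
          have hge : d.toNat ≤ n.toNat.minFac := by
            by_contra hlt
            push_neg at hlt
            exact pvInvNat hn hinv _ h2m hlt (Nat.minFac_dvd _)
          have hmm : d.toNat * d.toNat ≤ n.toNat := by
            calc d.toNat * d.toNat ≤ n.toNat.minFac * n.toNat.minFac :=
                  Nat.mul_le_mul hge hge
              _ = n.toNat.minFac ^ 2 := (sq _).symm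
              _ ≤ n.toNat := hsq
          have hdd : d * d ≤ n := by
            have hd' : (d.toNat : Int) = d := Int.toNat_of_nonneg (by omega)
            have hn' : (n.toNat : Int) = n := Int.toNat_of_nonneg (by omega)
            calc d * d = ((d.toNat : Int)) * ((d.toNat : Int)) := by rw [hd']
              _ = ((d.toNat * d.toNat : Nat) : Int) := by push_cast; ring
              _ ≤ ((n.toNat : Int)) := by exact_mod_cast hmm
              _ = n := hn'
          exact h1 hdd
        rw [if_pos (by simp; omega), pvOmega_step hnt, hprime.minFac_eq,
          Nat.div_self (by omega), pvOmega_small (by omega)]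
        omega

-- unfolding helpers for the terminal loop step
theorem pvPFLoop_stop (fuel : Nat) (n d : Int) (fs : List Int) (h : ¬ d ≤ n) :
    pvPFLoop (fuel + 1) n d fs = fs := by
  simp only [pvPFLoop]; rw [if_neg h]

theorem pvBLoop_stop (fuel : Nat) (n d cnt : Int) (h : ¬ d * d ≤ n) :
    pvBLoop (fuel + 1) n d cnt = (n, cnt) := by
  simp only [pvBLoop]; rw [if_neg h]

-- per-element results
theorem pvLenA (n : Int) : (pvPrimeFactorization n).length = pvOmega n.toNat := by
  unfold pvPrimeFactorization
  by_cases hn : 1 ≤ n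
  · exact (pvLemA _ n 2 [] hn (le_refl 2) (by intro e he hed _; omega) (by omega)).trans
      (by simp)
  · rw [show 2 * n.toNat + 64 = (2 * n.toNat + 63) + 1 from rfl,
      pvPFLoop_stop _ _ _ _ (by omega), pvOmega_small (by omega)]
    rfl

theorem pvCntB (n : Int) : pvNumPrimeFactors n = (pvOmega n.toNat : Int) := by
  unfold pvNumPrimeFactors
  by_cases hn : 1 ≤ n
  · have := pvLemB (2 * n.toNat + 64) n 2 0 hn (le_refl 2)
      (by intro e he hed _; omega) (by omega)
    simpa using this
  · rw [show 2 * n.toNat + 64 = (2 * n.toNat + 63) + 1 from rfl,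
      pvBLoop_stop _ _ _ _ (by omega)]
    rw [if_neg (by simp; omega), pvOmega_small (by omega)]
    simp

-- number of adjacent pairs whose two members both satisfy q
def pvPairs {α : Type} (q : α → Bool) : List α → Int
  | a :: b :: rest => (if q a && q b then 1 else 0) + pvPairs q (b :: rest)
  | _ => 0

theorem pvFoldA {α : Type} (q : α → Bool) (dflt : α) (t : List α) :
    ∀ (c : Int),
    ((List.range (t.length - 1)).foldl
      (fun count j =>
        if q (t.getD j dflt) && q (t.getD (j+1) dflt) then count + 1 else count) c)
      = c + pvPairs q t := by
  induction t with
  | nil => intro c; simp [pvPairs]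
  | cons a t' ih =>
    intro c
    cases t' with
    | nil => simp [pvPairs]
    | cons b rest =>
      have hlen : (a :: b :: rest).length - 1 = (b :: rest).length - 1 + 1 := by
        simp
      rw [hlen, List.range_succ_eq_map]
      simp only [List.foldl_cons, List.foldl_map]
      rw [show (fun (count : Int) j =>
            if q ((a :: b :: rest).getD (j.succ) dflt) &&
               q ((a :: b :: rest).getD (j.succ+1) dflt) then count + 1 else count)
          = (fun (count : Int) j =>
            if q ((b :: rest).getD j dflt) &&
               q ((b :: rest).getD (j+1) dflt) then count + 1 else count) from by
        funext count j; simp [List.getD]]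
      rw [ih]
      have h0 : (a :: b :: rest).getD 0 dflt = a := rfl
      have h1 : (a :: b :: rest).getD (0+1) dflt = b := rfl
      rw [h0, h1]
      simp only [pvPairs]
      split_ifs <;> omega

theorem pvPairs_map {α β : Type} (q : β → Bool) (f : α → β) (l : List α) :
    pvPairs q (l.map f) = pvPairs (fun x => q (f x)) l := by
  induction l with
  | nil => simp [pvPairs]
  | cons a l ih =>
    cases l with
    | nil => simp [pvPairs]
    | cons b rest =>
      simp only [List.map_cons, pvPairs]
      have h := ih
      simp only [List.map_cons] at h
      rw [h]

-- B's zip-with-tail fold is pvPairs of the flag list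
theorem pvZipFold (bs : List Bool) : ∀ (c : Int),
    (bs.zip bs.tail).foldl (fun s p => s + (if p.1 && p.2 then 1 else 0)) c
      = c + pvPairs id bs := by
  induction bs with
  | nil => intro c; simp [pvPairs]
  | cons a bs ih =>
    intro c
    cases bs with
    | nil => simp [pvPairs]
    | cons b rest =>
      simp only [List.tail_cons, List.zip_cons_cons, List.foldl_cons]
      rw [List.tail_cons] at ih
      rw [ih (c + if a && b then 1 else 0)]
      simp only [pvPairs, id_eq]
      split_ifs <;> omega

-- ===== VERDICT =====
theorem consec_kprimes_spec : Claim_equal_consec_kprimes := by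
  intro k arr _
  unfold Spec_consec_kprimes
  have hA : consec_kprimes k arr
      = pvPairs (fun fs => ((List.length fs : Int) == k)) (arr.map pvPrimeFactorization) := by
    unfold consec_kprimes
    rw [PySem.List.pyRange_one]
    have htn : ((arr.length : Int) - 1 - 0).toNat = (arr.map pvPrimeFactorization).length - 1 := by
      simp
    rw [htn, List.foldl_map]
    rw [show (fun (count : Int) (j : Nat) =>
          if (((PySem.List.pyGetD (arr.map pvPrimeFactorization) ((0 : Int) + (j : Int)) []).length : Int) == k) &&
             (((PySem.List.pyGetD (arr.map pvPrimeFactorization) ((0 : Int) + (j : Int) + 1) []).length : Int) == k)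
          then count + 1 else count)
        = (fun (count : Int) (j : Nat) =>
          if (((List.getD (arr.map pvPrimeFactorization) j ([] : List Int)).length : Int) == k) &&
             (((List.getD (arr.map pvPrimeFactorization) (j + 1) ([] : List Int)).length : Int) == k)
          then count + 1 else count) from by
      funext count j
      have h1 : (0 : Int) + (j : Int) = ((j : Nat) : Int) := by omega
      rw [h1]
      rw [show ((j : Int) + 1 = ((j + 1 : Nat) : Int)) from by push_cast; ring]
      rw [PySem.List.pyGetD_natCast, PySem.List.pyGetD_natCast]]
    rw [pvFoldA (fun fs => ((List.length fs : Int) == k)) ([] : List Int) (arr.map pvPrimeFactorization) 0]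
    exact zero_add _
  have hB : consec_kprimes_alt k arr
      = pvPairs id (arr.map (fun x => pvNumPrimeFactors x == k)) := by
    unfold consec_kprimes_alt
    rw [pvZipFold]
    exact zero_add _
  rw [hA, hB, pvPairs_map, pvPairs_map]
  congr 1
  funext n
  simp [pvLenA, pvCntB]
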